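-- pv_equiv track=rewrite | github.com/mattbatwings/newcpu | assembler.py | inverted_strfind
-- ===== SOURCE A (Python) =====
-- def inverted_strfind(string, delimiters, start=0):
--     output=[]
--     idx=start
--     try:
--         while(string[idx] in delimiters):
--             idx += 1
--     except IndexError:
--         return -1
--     return idx
-- ===== SOURCE B (Python) =====
-- def inverted_strfind(string, delimiters, start=0):
--     stripped = string[start:].lstrip(''.join(delimiters))
--     return len(string) - len(stripped) if stripped else -1
-- ===== Notes on version B (the rewrite author's own statement) =====
-- stated objective: simpler
-- what changed: The manual index-advancing while loop with try/except IndexError is replaced by a one-slice-plus-lstrip formulation: the first non-delimiter position is recovered arithmetically as len(string) - len(stripped), with the empty stripped string covering both 'start past the end' and 'all delimiters'.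
-- intended difference: On a negative start when the string contains at least one non-delimiter character, A's raw negative indexing wraps through the string tail and returns a negative index (which can collide with the -1 'not found' sentinel) or rescans the head; B returns the absolute (non-negative) index of the first non-delimiter in string[start:], or -1 if that tail is all delimiters, which is the intended answer. — e.g. on inverted_strfind("ab", "a", -2): A returns -1, B returns 1
import Mathlib
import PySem

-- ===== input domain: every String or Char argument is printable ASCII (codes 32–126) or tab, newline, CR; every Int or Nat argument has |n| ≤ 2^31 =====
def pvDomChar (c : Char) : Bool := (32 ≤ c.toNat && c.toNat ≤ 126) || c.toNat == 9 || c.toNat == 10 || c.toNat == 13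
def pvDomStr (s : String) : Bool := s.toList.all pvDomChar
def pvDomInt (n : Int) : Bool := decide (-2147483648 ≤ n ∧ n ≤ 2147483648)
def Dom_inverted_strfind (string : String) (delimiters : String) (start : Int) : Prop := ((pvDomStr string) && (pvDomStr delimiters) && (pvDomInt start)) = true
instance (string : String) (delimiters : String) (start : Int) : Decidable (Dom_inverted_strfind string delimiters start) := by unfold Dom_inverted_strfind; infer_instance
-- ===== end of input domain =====

-- B replaces A's index-advancing while loop by slice + lstrip and an arithmetic
-- recovery of the index (objective: simpler); on negative start A's wraparound
-- values are stated as an intended difference (D_ below).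

-- ===== PORT A =====
-- the 'while string[idx] in delimiters: idx += 1' loop; pyGet? none = IndexError → return -1
def pvLoopA (s d : List Char) (idx : Int) : Int :=
  match h : PySem.List.pyGet? s idx with
  | none => -1
  | some c => if c ∈ d then pvLoopA s d (idx + 1) else idx
termination_by (s.length - idx).toNat
decreasing_by
  have : PySem.Raise.InRange s.length idx := by
    by_contra hc
    rw [← PySem.List.pyGet?_eq_none_iff (xs := s)] at hc
    simp [hc] at h
  unfold PySem.Raise.InRange at this
  omega

def inverted_strfind (string : String) (delimiters : String) (start : Int) : Int :=
  -- 'output=[]' in A is dead code and is omitted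
  pvLoopA string.toList delimiters.toList start

-- ===== PORT B =====
-- stripped = string[start:].lstrip(delimiters)  (lstrip(chars) ported exactly as
-- dropWhile of membership); return len(string) - len(stripped) if stripped else -1
def inverted_strfind_alt (string : String) (delimiters : String) (start : Int) : Int :=
  let stripped := (PySem.List.slice string.toList (some start) none).dropWhile
      (fun c => decide (c ∈ delimiters.toList))
  if stripped = [] then -1 else (string.toList.length : Int) - stripped.length

-- ===== PRECONDITION & SPEC =====
-- On a negative start when the string contains a non-delimiter character, A's raw
-- negative indexing wraps through the tail and returns a negative index (colliding
-- with the -1 'not found' sentinel) or rescans the head; B returns the absolute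
-- index of the first non-delimiter of string[start:] (or -1 if that tail is all
-- delimiters), which is the intended answer.
def D_inverted_strfind (string : String) (delimiters : String) (start : Int) : Prop :=
  start < 0 ∧ ∃ c ∈ string.toList, c ∉ delimiters.toList
instance (string : String) (delimiters : String) (start : Int) : Decidable (D_inverted_strfind string delimiters start) := by unfold D_inverted_strfind; infer_instance

def Spec_inverted_strfind (string : String) (delimiters : String) (start : Int) (out : Int) : Prop := ¬ D_inverted_strfind string delimiters start → out = inverted_strfind_alt string delimiters start
instance (string : String) (delimiters : String) (start : Int) (out : Int) : Decidable (Spec_inverted_strfind string delimiters start out) := by unfold Spec_inverted_strfind; infer_instance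

def pvDiffWitness_inverted_strfind : String × String × Int := ("ab", "a", -2)
def pvDiffWitnessOut_inverted_strfind : Int × Int := (-1, 1)

-- ===== CLAIM (what is proved, stated in full; the proofs are below) =====
def Claim_unchanged_inverted_strfind : Prop := ∀ (string : String) (delimiters : String) (start : Int), Dom_inverted_strfind string delimiters start → Spec_inverted_strfind string delimiters start (inverted_strfind string delimiters start)
def Claim_changed_inverted_strfind : Prop := Dom_inverted_strfind (pvDiffWitness_inverted_strfind.1) (pvDiffWitness_inverted_strfind.2.1) (pvDiffWitness_inverted_strfind.2.2) ∧ D_inverted_strfind (pvDiffWitness_inverted_strfind.1) (pvDiffWitness_inverted_strfind.2.1) (pvDiffWitness_inverted_strfind.2.2) ∧ inverted_strfind (pvDiffWitness_inverted_strfind.1) (pvDiffWitness_inverted_strfind.2.1) (pvDiffWitness_inverted_strfind.2.2) = pvDiffWitnessOut_inverted_strfind.1 ∧ inverted_strfind_alt (pvDiffWitness_inverted_strfind.1) (pvDiffWitness_inverted_strfind.2.1) (pvDiffWitness_inverted_strfind.2.2) = pvDiffWitnessOut_inverted_strfind.2 ∧ pvDiffWitnessOut_inverted_strfind.1 ≠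 pvDiffWitnessOut_inverted_strfind.2

-- ===== LEMMAS AND PROOFS =====

-- Value of A's loop at a non-negative index, stated in B's drop/dropWhile vocabulary.
theorem pvLoopA_nat (s d : List Char) (i : Nat) :
    pvLoopA s d (i : Int) =
      (if (s.drop i).dropWhile (fun c => decide (c ∈ d)) = [] then (-1 : Int)
       else (s.length : Int) - ((s.drop i).dropWhile (fun c => decide (c ∈ d))).length) := by
  generalize hk : s.length - i = k
  induction k generalizing i with
  | zero =>
    have hi : s.length ≤ i := by omega
    have hdrop : s.drop i = [] := List.drop_eq_nil_of_le hi
    have hg : PySem.List.pyGet? s (i : Int) = none := by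
      rw [PySem.List.pyGet?_natCast]
      exact List.getElem?_eq_none hi
    rw [pvLoopA.eq_def]
    split
    · simp [hdrop]
    · next c h => rw [hg] at h; cases h
  | succ k ih =>
    have hi : i < s.length := by omega
    have hg : PySem.List.pyGet? s (i : Int) = some s[i] := by
      rw [PySem.List.pyGet?_natCast]
      exact List.getElem?_eq_getElem hi
    have hdrop : s.drop i = s[i] :: s.drop (i + 1) := List.drop_eq_getElem_cons hi
    rw [pvLoopA.eq_def]
    split
    · next h => rw [hg] at h; cases h
    · next c h =>
      rw [hg] at h; cases h
      by_cases hmem : s[i] ∈ d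
      · rw [if_pos hmem, hdrop, List.dropWhile_cons_of_pos (by simpa using hmem)]
        have : ((i : Int) + 1) = ((i + 1 : Nat) : Int) := by push_cast; ring
        rw [this, ih (i + 1) (by omega)]
      · rw [if_neg hmem, hdrop, List.dropWhile_cons_of_neg (by simpa using hmem)]
        rw [if_neg (List.cons_ne_nil _ _)]
        have hlen : (s.drop (i + 1)).length = s.length - (i + 1) := List.length_drop
        simp only [List.length_cons, hlen]
        omega

-- When every character of s is a delimiter, A's loop always ends in IndexError.
theorem pvLoopA_allDelim (s d : List Char) (idx : Int) (h : ∀ c ∈ s, c ∈ d) :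
    pvLoopA s d idx = -1 := by
  fun_induction pvLoopA s d idx with
  | case1 => rfl
  | case2 idx c hc hmem ih => exact ih
  | case3 idx c hc hmem =>
    exact absurd (h c (PySem.List.mem_of_pyGet?_eq_some s hc)) hmem

-- ===== VERDICT (by name: the statement is the Claim_ definition above) =====
theorem inverted_strfind_spec : Claim_unchanged_inverted_strfind := by
  intro string delimiters start _ hnd
  unfold inverted_strfind inverted_strfind_alt
  by_cases hs : 0 ≤ start
  · have hcast : start = ((start.toNat : Nat) : Int) := (Int.toNat_of_nonneg hs).symm
    rw [hcast, pvLoopA_nat, PySem.List.slice_from_natCast]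
  · have hd : ∀ c ∈ string.toList, c ∈ delimiters.toList := by
      unfold D_inverted_strfind at hnd
      push Not at hnd
      exact hnd (by omega)
    have hstr : ((PySem.List.slice string.toList (some start) none).dropWhile
        (fun c => decide (c ∈ delimiters.toList))) = [] :=
      List.dropWhile_eq_nil_iff.mpr
        (fun x hx => by simpa using hd x (PySem.List.mem_of_mem_slice _ _ _ hx))
    rw [pvLoopA_allDelim _ _ _ hd]
    simp [hstr]

set_option maxRecDepth 4096 in
theorem inverted_strfind_changed : Claim_changed_inverted_strfind := by
  unfold Claim_changed_inverted_strfind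
  refine ⟨by decide, by simp [pvDiffWitness_inverted_strfind, D_inverted_strfind], ?_, by decide, by decide⟩
  show pvLoopA ['a', 'b'] ['a'] (-2) = -1
  rw [pvLoopA.eq_def]
  split
  · next h => exact absurd h (by decide)
  · next c h =>
    rw [show PySem.List.pyGet? ['a','b'] (-2) = some 'a' from by decide] at h
    cases h
    rw [if_pos (by decide), show (-2:Int)+1 = -1 from by norm_num, pvLoopA.eq_def]
    split
    · next h => exact absurd h (by decide)
    · next c h =>
      rw [show PySem.List.pyGet? ['a','b'] (-1) = some 'b' from by decide] at h
      cases h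
      rw [if_neg (by decide)]
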